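-- pv_equiv track=rewrite | github.com/GauravBh1010tt/DeepLearn | TrecQA_CNN+Sim/dl_text/rd_ft.py | LCW
-- ===== SOURCE A (Python) =====
-- def LCW(t1, t2):
--     lcs = []
--     for w1 in t1.split():
--         for w2 in t2.split():
--             if w1 in w2:
--                 lcs.append(len(w1))
--     if len(lcs)==0:
--         return 0
--     else:
--         return max(lcs)
-- ===== SOURCE B (Python) =====
-- def LCW(t1, t2):
--     words2 = t2.split()
--     for w1 in sorted(t1.split(), key=len, reverse=True):
--         if any(w1 in w2 for w2 in words2):
--             return len(w1)
--     return 0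
-- ===== Notes on version B (the rewrite author's own statement) =====
-- stated objective: alternative
-- what changed: Instead of collecting a length for every (w1,w2) substring pair and taking max at the end, B sorts the t1-words by length descending and returns the length of the first word that is a substring of some t2-word, stopping early.
import Mathlib
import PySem

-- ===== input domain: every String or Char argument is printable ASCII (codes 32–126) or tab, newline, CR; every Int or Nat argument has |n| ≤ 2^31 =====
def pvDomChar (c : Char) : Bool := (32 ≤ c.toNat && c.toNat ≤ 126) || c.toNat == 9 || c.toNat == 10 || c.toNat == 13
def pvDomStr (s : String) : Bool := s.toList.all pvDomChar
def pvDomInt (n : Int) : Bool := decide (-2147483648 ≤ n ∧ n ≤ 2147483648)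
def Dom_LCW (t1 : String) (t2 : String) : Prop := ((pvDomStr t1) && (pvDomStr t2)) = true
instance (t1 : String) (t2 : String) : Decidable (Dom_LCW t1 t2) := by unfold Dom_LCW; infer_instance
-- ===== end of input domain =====

-- B: sorts t1's words by length descending and returns the length of the first one that is
-- a substring of some t2-word (0 if none), instead of A's collect-all-lengths-then-max.
-- ===== PORT A =====
def LCW (t1 : String) (t2 : String) : Int :=
  let lcs : List Int := (PySem.Str.split₀ t1).foldl (fun acc w1 =>
    (PySem.Str.split₀ t2).foldl (fun acc2 w2 =>
      if PySem.Str.isIn w1 w2 then acc2 ++ [PySem.Str.len w1] else acc2) acc) []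
  if lcs.length = 0 then 0 else (PySem.List.max? lcs (fun x => x)).getD 0

-- ===== PORT B =====
-- the early-return for-loop of Source B
def LCWscan (ws2 : List String) : List String → Int
  | [] => 0
  | w1 :: rest =>
    if ws2.any (fun w2 => PySem.Str.isIn w1 w2) then PySem.Str.len w1 else LCWscan ws2 rest

def LCW_alt (t1 : String) (t2 : String) : Int :=
  let words2 := PySem.Str.split₀ t2
  LCWscan words2 (PySem.List.sorted (PySem.Str.split₀ t1) (fun w => PySem.Str.len w) true)

-- ===== PRECONDITION & SPEC =====
def Spec_LCW (t1 : String) (t2 : String) (out : Int) : Prop := out = LCW_alt t1 t2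
instance (t1 : String) (t2 : String) (out : Int) : Decidable (Spec_LCW t1 t2 out) := by unfold Spec_LCW; infer_instance

-- ===== CLAIM (what is proved, stated in full; the proofs are below) =====
def Claim_equal_LCW : Prop := ∀ (t1 : String) (t2 : String), Dom_LCW t1 t2 → Spec_LCW t1 t2 (LCW t1 t2)

-- ===== LEMMAS AND PROOFS =====

-- ===== VERDICT (by name: the statement is the Claim_ definition above) =====
-- lcs is the flatMap form of A's nested loop
theorem LCW_lcs_eq (ws1 ws2 : List String) (acc : List Int) :
    ws1.foldl (fun acc w1 =>
      ws2.foldl (fun acc2 w2 =>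
        if PySem.Str.isIn w1 w2 then acc2 ++ [PySem.Str.len w1] else acc2) acc) acc
    = acc ++ ws1.flatMap (fun w1 => (ws2.filter (fun w2 => PySem.Str.isIn w1 w2)).map
        (fun _ => PySem.Str.len w1)) := by
  induction ws1 generalizing acc with
  | nil => simp
  | cons w rest ih =>
    simp only [List.foldl_cons, List.flatMap_cons, ih,
      PySem.List.foldl_append_if (p := fun w2 => PySem.Str.isIn w w2)
        (f := fun _ => PySem.Str.len w)]
    simp [List.append_assoc]

theorem mem_lcs_iff (ws1 ws2 : List String) (x : Int) :
    x ∈ ws1.flatMap (fun w1 => (ws2.filter (fun w2 => PySem.Str.isIn w1 w2)).map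
        (fun _ => PySem.Str.len w1))
    ↔ ∃ w1 ∈ ws1, ws2.any (fun w2 => PySem.Str.isIn w1 w2) = true ∧ x = PySem.Str.len w1 := by
  simp only [List.mem_flatMap, List.mem_map, List.mem_filter, List.any_eq_true]
  constructor
  · rintro ⟨w1, h1, ⟨w2, ⟨h2, hin⟩, hx⟩⟩
    exact ⟨w1, h1, ⟨w2, h2, hin⟩, hx.symm⟩
  · rintro ⟨w1, h1, ⟨w2, h2, hin⟩, hx⟩
    exact ⟨w1, h1, ⟨w2, ⟨h2, hin⟩, hx.symm⟩⟩

-- the scan on a length-descending list: either no word matches and it returns 0,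
-- or it returns the length of a matching word maximal among all matches
theorem LCWscan_spec (ws2 : List String) (l : List String)
    (hp : l.Pairwise (fun a b => PySem.Str.len b ≤ PySem.Str.len a)) :
    (LCWscan ws2 l = 0 ∧ ∀ w ∈ l, ws2.any (fun w2 => PySem.Str.isIn w w2) = false)
    ∨ (∃ w ∈ l, ws2.any (fun w2 => PySem.Str.isIn w w2) = true ∧ LCWscan ws2 l = PySem.Str.len w ∧
        ∀ w' ∈ l, ws2.any (fun w2 => PySem.Str.isIn w' w2) = true → PySem.Str.len w' ≤ PySem.Str.len w) := by
  induction l with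
  | nil => exact Or.inl ⟨rfl, by simp⟩
  | cons w rest ih =>
    rcases List.pairwise_cons.mp hp with ⟨hw, hrest⟩
    by_cases h : ws2.any (fun w2 => PySem.Str.isIn w w2) = true
    · refine Or.inr ⟨w, List.mem_cons_self, h, ?_, ?_⟩
      · simp only [LCWscan]; rw [if_pos h]
      · intro w' hw' _
        rcases List.mem_cons.mp hw' with rfl | hmem
        · exact le_refl _
        · exact hw w' hmem
    · have hfalse : ws2.any (fun w2 => PySem.Str.isIn w w2) = false := by
        simpa using h
      have hstep : LCWscan ws2 (w :: rest) = LCWscan ws2 rest := by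
        simp only [LCWscan]; rw [if_neg h]
      rcases ih hrest with ⟨h0, hnone⟩ | ⟨w0, hmem, hmatch, heq, hmax⟩
      · refine Or.inl ⟨by rw [hstep]; exact h0, ?_⟩
        intro x hx
        rcases List.mem_cons.mp hx with rfl | hx'
        · exact hfalse
        · exact hnone x hx'
      · refine Or.inr ⟨w0, List.mem_cons_of_mem _ hmem, hmatch, by rw [hstep]; exact heq, ?_⟩
        intro w' hw' hm'
        rcases List.mem_cons.mp hw' with rfl | hx'
        · exact absurd hm' h
        · exact hmax w' hx' hm'

-- ===== VERDICT (by name: the statement is the Claim_ definition above) =====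
theorem LCW_spec : Claim_equal_LCW := by
  unfold Claim_equal_LCW
  intro t1 t2 _
  unfold Spec_LCW LCW LCW_alt
  set ws1 := PySem.Str.split₀ t1 with hws1
  set ws2 := PySem.Str.split₀ t2 with hws2
  set l := PySem.List.sorted ws1 (fun w => PySem.Str.len w) true with hl
  have hperm : l.Perm ws1 := PySem.List.sorted_perm ..
  have hpair : l.Pairwise (fun a b => PySem.Str.len b ≤ PySem.Str.len a) :=
    PySem.List.sorted_pairwise_rev ..
  have hmem : ∀ x, x ∈ l ↔ x ∈ ws1 := fun x => hperm.mem_iff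
  rw [LCW_lcs_eq]
  simp only [List.nil_append]
  set lcs := ws1.flatMap (fun w1 => (ws2.filter (fun w2 => PySem.Str.isIn w1 w2)).map
      (fun _ => PySem.Str.len w1)) with hlcs
  rcases LCWscan_spec ws2 l hpair with ⟨h0, hnone⟩ | ⟨w0, hmem0, hmatch0, heq0, hmax0⟩
  · have hempty : lcs = [] := by
      rcases hx : lcs with _ | ⟨x, tl⟩
      · rfl
      · exfalso
        have : x ∈ lcs := by rw [hx]; exact List.mem_cons_self
        rcases (mem_lcs_iff ws1 ws2 x).mp this with ⟨w1, h1, hany, _⟩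
        have := hnone w1 ((hmem w1).mpr h1)
        rw [this] at hany
        exact Bool.false_ne_true hany
    simp [hempty, h0]
  · have hne : lcs ≠ [] := by
      intro hempty
      have : PySem.Str.len w0 ∈ lcs := (mem_lcs_iff ws1 ws2 _).mpr
        ⟨w0, (hmem w0).mp hmem0, hmatch0, rfl⟩
      rw [hempty] at this
      exact (List.not_mem_nil) this
    have hlen : lcs.length ≠ 0 := by
      simpa [List.length_eq_zero_iff] using hne
    rcases hM : PySem.List.max? lcs (fun x => x) with _ | M
    · exact absurd ((PySem.List.max?_eq_none_iff ..).mp hM) hne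
    · have hMmem : M ∈ lcs := PySem.List.max?_mem hM
      have hMmax : ∀ y ∈ lcs, y ≤ M := fun y hy => PySem.List.max?_isMax hM y hy
      rcases (mem_lcs_iff ws1 ws2 M).mp hMmem with ⟨wM, hwM, hanyM, hMeq⟩
      have h1 : M ≤ PySem.Str.len w0 := by
        rw [hMeq]
        exact hmax0 wM ((hmem wM).mpr hwM) hanyM
      have h2 : PySem.Str.len w0 ≤ M := hMmax _ ((mem_lcs_iff ws1 ws2 _).mpr
        ⟨w0, (hmem w0).mp hmem0, hmatch0, rfl⟩)
      have h3 : PySem.Str.len w0 = M := le_antisymm h2 h1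
      simp only [PySem.Str.len_eq] at h3
      simp [hlen, heq0, ← h3]
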